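-- pv_equiv track=rewrite | github.com/NeshSab/ai_interview_app_streamlit | app/app.py | extract_last_qa
-- ===== SOURCE A (Python) =====
-- def extract_last_qa(history: list[dict[str, str]]) -> tuple[str, str]:
--     """
--     Return (previous_assistant_question, last_user_answer) from the history.
--     If not present, returns ("", "").
--     """
--     last_user = ""
--     prev_assistant = ""
--
--     for idx in range(len(history) - 1, -1, -1):
--         m = history[idx]
--         if m.get("role") == "user":
--             last_user = (m.get("content") or "").strip()
--             for j in range(idx - 1, -1, -1):
--                 if history[j].get("role") == "assistant":
--                     prev_assistant = (history[j].get("content") or "").strip()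
--                     break
--             break
--
--     return prev_assistant, last_user
-- ===== SOURCE B (Python) =====
-- def extract_last_qa(history: list[dict[str, str]]) -> tuple[str, str]:
--     """
--     Return (previous_assistant_question, last_user_answer) from the history.
--     If not present, returns ("", "").
--     """
--     last_assistant = ""
--     candidate = None
--     for m in history:
--         role = m.get("role")
--         if role == "assistant":
--             last_assistant = m.get("content") or ""
--         elif role == "user":
--             candidate = (last_assistant, m.get("content") or "")
--     if candidate is None:
--         return "", ""
--     return candidate[0].strip(), candidate[1].strip()
-- ===== Notes on version B (the rewrite author's own statement) =====
-- stated objective: simpler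
-- what changed: Replaced A's backward index scan with a nested backward inner scan for the preceding assistant by a single forward pass that keeps the most recent assistant content and records an (assistant, user) candidate at each user message.
import Mathlib
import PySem

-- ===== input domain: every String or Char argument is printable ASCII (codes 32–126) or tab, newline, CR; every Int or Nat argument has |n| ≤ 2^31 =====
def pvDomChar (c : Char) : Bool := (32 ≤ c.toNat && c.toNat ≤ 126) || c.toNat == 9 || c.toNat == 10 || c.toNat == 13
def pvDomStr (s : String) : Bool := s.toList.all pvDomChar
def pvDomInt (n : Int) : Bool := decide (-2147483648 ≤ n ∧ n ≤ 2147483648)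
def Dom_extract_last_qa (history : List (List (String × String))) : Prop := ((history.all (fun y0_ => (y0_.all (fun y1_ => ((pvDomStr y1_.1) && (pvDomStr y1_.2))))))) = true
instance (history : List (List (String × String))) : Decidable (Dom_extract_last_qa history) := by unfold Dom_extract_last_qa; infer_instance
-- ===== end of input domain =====

-- B replaces A's backward scan with a nested backward inner scan by one forward pass
-- keeping the most recent assistant content (objective: simpler, one pass).

-- ===== PORT A =====
-- m.get("role") / m.get("content") on the association-list dict (first match):
def pvRole (m : List (String × String)) : Option String := (PySem.Dict.mk m).get? "role"
-- (m.get("content") or "") : a missing key (None) and the empty string both yield ""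
def pvContent (m : List (String × String)) : String := ((PySem.Dict.mk m).get? "content").getD ""

-- inner loop: for j in range(idx-1, -1, -1): … break  (indices produced by pyRange are in range,
-- so the .getD [] default of the pyGet? lookup is never taken)
def pvAInner (h : List (List (String × String))) : List Int → String
  | [] => ""
  | j :: rest =>
    let mj := (PySem.List.pyGet? h j).getD []
    if pvRole mj == some "assistant" then PySem.Str.strip (pvContent mj)
    else pvAInner h rest

-- outer loop: for idx in range(len(history)-1, -1, -1): … break
def pvAOuter (h : List (List (String × String))) : List Int → String × String
  | [] => ("", "")
  | idx :: rest =>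
    let m := (PySem.List.pyGet? h idx).getD []
    if pvRole m == some "user" then
      (pvAInner h (PySem.List.pyRange (idx - 1) (-1) (-1)), PySem.Str.strip (pvContent m))
    else pvAOuter h rest

def extract_last_qa (history : List (List (String × String))) : String × String :=
  pvAOuter history (PySem.List.pyRange ((history.length : Int) - 1) (-1) (-1))

-- ===== PORT B =====
-- one forward step: track last assistant content, record candidate pair at each user message
def pvBStep (st : String × Option (String × String)) (m : List (String × String)) :
    String × Option (String × String) :=
  let r := pvRole m
  if r == some "assistant" then (pvContent m, st.2)
  else if r == some "user" then (st.1, some (st.1, pvContent m))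
  else st

def extract_last_qa_alt (history : List (List (String × String))) : String × String :=
  match (history.foldl pvBStep ("", none)).2 with
  | some (a, u) => (PySem.Str.strip a, PySem.Str.strip u)
  | none => ("", "")

-- ===== PRECONDITION & SPEC =====
def Spec_extract_last_qa (history : List (List (String × String))) (out : String × String) : Prop := out = extract_last_qa_alt history
instance (history : List (List (String × String))) (out : String × String) : Decidable (Spec_extract_last_qa history out) := by unfold Spec_extract_last_qa; infer_instance

-- ===== CLAIM (what is proved, stated in full; the proofs are below) =====
def Claim_equal_extract_last_qa : Prop := ∀ (history : List (List (String × String))), Dom_extract_last_qa history → Spec_extract_last_qa history (extract_last_qa history)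

-- ===== LEMMAS AND PROOFS =====

-- reference functions, by structural recursion on the REVERSED history
def pvFirstA : List (List (String × String)) → String
  | [] => ""
  | m :: rest => if pvRole m == some "assistant" then pvContent m else pvFirstA rest

def pvGRev : List (List (String × String)) → String × String
  | [] => ("", "")
  | m :: rest =>
    if pvRole m == some "user" then (PySem.Str.strip (pvFirstA rest), PySem.Str.strip (pvContent m))
    else pvGRev rest

-- appending a message does not change lookups at indices inside the prefix
theorem pvGet_append {α : Type} (h : List α) (m : α) (d : α) (j : Int) (h0 : 0 ≤ j)
    (hj : j < (h.length : Int)) :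
    (PySem.List.pyGet? (h ++ [m]) j).getD d = (PySem.List.pyGet? h j).getD d := by
  rw [PySem.List.pyGet?_of_nonneg _ h0, PySem.List.pyGet?_of_nonneg _ h0,
    List.getElem?_append_left (show j.toNat < h.length by omega)]

theorem pvAInner_stable (h : List (List (String × String))) (m : List (String × String))
    (L : List Int) (hL : ∀ j ∈ L, 0 ≤ j ∧ j < (h.length : Int)) :
    pvAInner (h ++ [m]) L = pvAInner h L := by
  induction L with
  | nil => rfl
  | cons j rest ih =>
    obtain ⟨h0, hj⟩ := hL j (by simp)
    simp only [pvAInner, pvGet_append h m [] j h0 hj]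
    split
    · rfl
    · exact ih (fun x hx => hL x (by simp [hx]))

theorem pvAOuter_stable (h : List (List (String × String))) (m : List (String × String))
    (L : List Int) (hL : ∀ j ∈ L, 0 ≤ j ∧ j < (h.length : Int)) :
    pvAOuter (h ++ [m]) L = pvAOuter h L := by
  induction L with
  | nil => rfl
  | cons idx rest ih =>
    obtain ⟨h0, hidx⟩ := hL idx (by simp)
    simp only [pvAOuter, pvGet_append h m [] idx h0 hidx]
    split
    · rw [pvAInner_stable]
      intro j hj
      rw [PySem.List.mem_pyRange_neg_one] at hj
      omega
    · exact ih (fun x hx => hL x (by simp [hx]))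

theorem pvStrip_empty : PySem.Str.strip "" = "" := by decide

theorem pvAInner_eq (h : List (List (String × String))) :
    pvAInner h (PySem.List.pyRange ((h.length : Int) - 1) (-1) (-1)) =
      PySem.Str.strip (pvFirstA h.reverse) := by
  induction h using List.reverseRecOn with
  | nil => simp [pvAInner, pvFirstA, PySem.List.pyRange_neg_one_eq_nil, pvStrip_empty]
  | append_singleton t m ih =>
    have hlen : ((t ++ [m]).length : Int) - 1 = (t.length : Int) := by simp
    rw [hlen, PySem.List.pyRange_neg_one_cons (by omega : (-1 : Int) < (t.length : Int))]
    simp only [pvAInner, PySem.List.pyGet?_append_length, Option.getD_some, List.reverse_append,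
      List.reverse_singleton, List.singleton_append, pvFirstA]
    split
    · rfl
    · rw [pvAInner_stable t m _ (fun j hj => by
        rw [PySem.List.mem_pyRange_neg_one] at hj; omega)]
      exact ih

theorem pvAOuter_eq (h : List (List (String × String))) :
    pvAOuter h (PySem.List.pyRange ((h.length : Int) - 1) (-1) (-1)) = pvGRev h.reverse := by
  induction h using List.reverseRecOn with
  | nil => rfl
  | append_singleton t m ih =>
    have hlen : ((t ++ [m]).length : Int) - 1 = (t.length : Int) := by simp
    rw [hlen, PySem.List.pyRange_neg_one_cons (by omega : (-1 : Int) < (t.length : Int))]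
    simp only [pvAOuter, PySem.List.pyGet?_append_length, Option.getD_some, List.reverse_append,
      List.reverse_singleton, List.singleton_append, pvGRev]
    split
    · rw [pvAInner_stable t m _ (fun j hj => by
        rw [PySem.List.mem_pyRange_neg_one] at hj; omega)]
      rw [pvAInner_eq t]
    · rw [pvAOuter_stable t m _ (fun j hj => by
        rw [PySem.List.mem_pyRange_neg_one] at hj; omega)]
      exact ih

theorem pvB_char (h : List (List (String × String))) :
    (h.foldl pvBStep ("", none)).1 = pvFirstA h.reverse ∧
      extract_last_qa_alt h = pvGRev h.reverse := by
  induction h using List.reverseRecOn with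
  | nil => exact ⟨rfl, rfl⟩
  | append_singleton t m ih =>
    obtain ⟨ih1, ih2⟩ := ih
    have hfold : (t ++ [m]).foldl pvBStep ("", none) = pvBStep (t.foldl pvBStep ("", none)) m := by
      simp
    have step : extract_last_qa_alt (t ++ [m]) =
        (match (pvBStep (t.foldl pvBStep ("", none)) m).2 with
          | some (a, u) => (PySem.Str.strip a, PySem.Str.strip u)
          | none => ("", "")) := by
      simp only [extract_last_qa_alt, hfold]
    simp only [List.reverse_append, List.reverse_singleton, List.singleton_append]
    cases hr : pvRole m with
    | none =>
      constructor
      · rw [hfold]; simp [pvBStep, hr, pvFirstA, ih1]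
      · rw [step]; simp only [pvBStep, hr]
        simpa [pvGRev, hr, extract_last_qa_alt] using ih2
    | some r =>
      by_cases ha : r = "assistant"
      · subst ha
        constructor
        · rw [hfold]; simp [pvBStep, hr, pvFirstA]
        · rw [step]; simp only [pvBStep, hr]
          simpa [pvGRev, hr, extract_last_qa_alt] using ih2
      · by_cases hu : r = "user"
        · subst hu
          have hfa : pvFirstA (m :: t.reverse) = pvFirstA t.reverse := by
            simp [pvFirstA, hr]
          constructor
          · rw [hfold]; simp [pvBStep, hr, hfa, ih1]
          · rw [step]; simp only [pvBStep, hr]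
            simp [pvGRev, hr, ih1]
        · constructor
          · rw [hfold]; simp [pvBStep, pvFirstA, hr, ih1, hu, ha]
          · rw [step]; simp only [pvBStep, hr]
            simpa [pvGRev, hr, ha, hu, extract_last_qa_alt] using ih2

-- ===== VERDICT (by name: the statement is the Claim_ definition above) =====
theorem extract_last_qa_spec : Claim_equal_extract_last_qa := by
  intro history _
  unfold Spec_extract_last_qa extract_last_qa
  rw [pvAOuter_eq history, (pvB_char history).2]
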